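-- pv_equiv track=rewrite | github.com/elimh/ERC_BHEfield_Data_Code | helpers/analyse.py | get_ID_strings
-- ===== SOURCE A (Python) =====
-- def generate_ID_strings_per_shaft(before='Probe_', after='_T_in'):
--     """
--     Generate lists of formatted ID strings for different shaft orientations.
--
--     This function generates three lists of formatted ID strings based on predefined
--     identifiers for west, south, and east shafts. The identifiers are combined with
--     the provided prefixes and suffixes to create the final ID strings.
--
--     Args:
--         before (str): The prefix string to add before the ID number. Default is 'Probe_'.
--         after (str): The suffix string to add after the ID number. Default is '_T_in'.
--
--     Returns:
--         tuple: A tuple containing three lists of formatted ID strings: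
--             - west (list of str): Formatted ID strings for the west shaft.
--             - south (list of str): Formatted ID strings for the south shaft.
--             - east (list of str): Formatted ID strings for the east shaft.
--     """
--
--     # Define the identifier lists for each shaft orientation
--     west_ids = [1, 2, 3, 4, 5, 6, 7, 8, 9, 10, 11, 12]
--     south_ids = [13, 14, 15, 16, 17, 18, 19, 20, 21, 22, 24, 25]
--     east_ids = [23, 26, 27, 28, 29, 30, 31, 32, 33, 34, 35, 36, 37, 38, 39, 40]
--
--     # Generate the formatted ID strings for each shaft orientation
--     west = [f'{before}{x:02}{after}' for x in west_ids]
--     south = [f'{before}{x:02}{after}' for x in south_ids]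
--     east = [f'{before}{x:02}{after}' for x in east_ids]
--
--     return west, south, east
--
-- def get_ID_strings(after='T_in', masked_BHEs=None):
--     """
--     Generate ID strings for three shafts (west, south, east) and remove any masked BHEs if provided.
--
--     This function calls `generate_ID_strings_per_shaft` to obtain initial ID strings for the
--     west, south, and east shafts. If a list of masked BHEs is provided, the function will remove
--     these masked BHEs from the corresponding shaft lists.
--
--     Parameters:
--     after (str): A string parameter passed to `generate_ID_strings_per_shaft`. Default is 'T_in'.
--     masked_BHEs (list): A list of BHEs (Borehole Heat Exchangers) to be masked. Default is None.
--
--     Returns: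
--     tuple: Three lists containing the ID strings for the west, south, and east shafts respectively.
--     """
--
--     # Generate ID strings for each shaft
--     west, south, east = generate_ID_strings_per_shaft(after=after)
--
--     # Check if masked_BHEs is provided
--     if masked_BHEs is not None:
--         for masked in masked_BHEs:
--             # Remove masked BHEs from the west list if present
--             if masked in west:
--                 west.remove(masked)
--             # Remove masked BHEs from the south list if present
--             elif masked in south:
--                 south.remove(masked)
--             # Remove masked BHEs from the east list if present
--             elif masked in east:
--                 east.remove(masked)
--
--     return west, south, east
-- ===== SOURCE B (Python) =====
-- def get_ID_strings(after='T_in', masked_BHEs=None):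
--     masked = set(masked_BHEs) if masked_BHEs is not None else set()
--     west_ids = [1, 2, 3, 4, 5, 6, 7, 8, 9, 10, 11, 12]
--     south_ids = [13, 14, 15, 16, 17, 18, 19, 20, 21, 22, 24, 25]
--     east_ids = [23, 26, 27, 28, 29, 30, 31, 32, 33, 34, 35, 36, 37, 38, 39, 40]
--
--     def build(ids):
--         return [s for s in (f'Probe_{x:02}{after}' for x in ids) if s not in masked]
--
--     return build(west_ids), build(south_ids), build(east_ids)
-- ===== Notes on version B (the rewrite author's own statement) =====
-- stated objective: simpler
-- what changed: B drops the helper-then-mutate structure: instead of generating the three lists and looping over masked_BHEs with list membership tests and in-place .remove on whichever list contains each target, B builds a mask set once and constructs each shaft list in a single build-and-filter comprehension keeping only non-masked IDs.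
import Mathlib
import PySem

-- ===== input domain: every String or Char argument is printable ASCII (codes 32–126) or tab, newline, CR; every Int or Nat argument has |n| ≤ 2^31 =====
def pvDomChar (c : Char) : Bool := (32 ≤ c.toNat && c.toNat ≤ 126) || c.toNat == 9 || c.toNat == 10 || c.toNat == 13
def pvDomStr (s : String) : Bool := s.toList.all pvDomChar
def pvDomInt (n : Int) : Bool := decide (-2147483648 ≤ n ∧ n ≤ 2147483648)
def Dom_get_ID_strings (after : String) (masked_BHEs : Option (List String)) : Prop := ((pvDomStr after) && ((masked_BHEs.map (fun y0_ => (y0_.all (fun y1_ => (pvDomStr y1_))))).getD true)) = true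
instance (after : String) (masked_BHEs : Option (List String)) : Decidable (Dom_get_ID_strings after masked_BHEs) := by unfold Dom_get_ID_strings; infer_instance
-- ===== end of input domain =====

-- B replaces A's mutate-in-place `.remove` loop over the mask targets by building each
-- shaft list in one pass, keeping only the IDs not in the mask set (objective: simpler).

-- ===== PORT A =====
-- f'{before}{x:02}{after}' — exact for 0 ≤ x < 100, which covers every literal id here
def pvFmt (after : String) (x : Int) : String :=
  "Probe_" ++ (if x < 10 then "0" ++ PySem.Int.toStr x else PySem.Int.toStr x) ++ after

def pvWestIds : List Int := [1, 2, 3, 4, 5, 6, 7, 8, 9, 10, 11, 12]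
def pvSouthIds : List Int := [13, 14, 15, 16, 17, 18, 19, 20, 21, 22, 24, 25]
def pvEastIds : List Int := [23, 26, 27, 28, 29, 30, 31, 32, 33, 34, 35, 36, 37, 38, 39, 40]

-- one iteration of A's `for masked in masked_BHEs` loop body
def pvStep (st : List String × List String × List String) (m : String) :
    List String × List String × List String :=
  let (w, s, e) := st
  if m ∈ w then ((PySem.List.remove? w m).getD w, s, e)
  else if m ∈ s then (w, (PySem.List.remove? s m).getD s, e)
  else if m ∈ e then (w, s, (PySem.List.remove? e m).getD e)
  else (w, s, e)

def get_ID_strings (after : String) (masked_BHEs : Option (List String)) :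
    List String × List String × List String :=
  let west := pvWestIds.map (pvFmt after)
  let south := pvSouthIds.map (pvFmt after)
  let east := pvEastIds.map (pvFmt after)
  match masked_BHEs with
  | none => (west, south, east)
  | some ms => ms.foldl pvStep (west, south, east)

-- ===== PORT B =====
def pvBuild (after : String) (masked : PySem.Set String) (ids : List Int) : List String :=
  (ids.map (pvFmt after)).filter (fun s => !(PySem.Set.contains masked s))

def get_ID_strings_alt (after : String) (masked_BHEs : Option (List String)) :
    List String × List String × List String :=
  let masked : PySem.Set String :=
    match masked_BHEs with
    | some ms => PySem.Set.ofList ms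
    | none => PySem.Set.empty
  (pvBuild after masked pvWestIds, pvBuild after masked pvSouthIds, pvBuild after masked pvEastIds)

-- ===== PRECONDITION & SPEC =====
def Spec_get_ID_strings (after : String) (masked_BHEs : Option (List String)) (out : List String × List String × List String) : Prop := out = get_ID_strings_alt after masked_BHEs
instance (after : String) (masked_BHEs : Option (List String)) (out : List String × List String × List String) : Decidable (Spec_get_ID_strings after masked_BHEs out) := by unfold Spec_get_ID_strings; infer_instance

-- ===== CLAIM (what is proved, stated in full; the proofs are below) =====
def Claim_equal_get_ID_strings : Prop := ∀ (after : String) (masked_BHEs : Option (List String)), Dom_get_ID_strings after masked_BHEs → Spec_get_ID_strings after masked_BHEs (get_ID_strings after masked_BHEs)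

-- ===== LEMMAS AND PROOFS =====

-- the two middle characters of each formatted id, as concrete strings
def pvCore (x : Int) : String :=
  if x < 10 then "0" ++ PySem.Int.toStr x else PySem.Int.toStr x

lemma pvFmt_eq (after : String) (x : Int) :
    pvFmt after x = "Probe_" ++ pvCore x ++ after := rfl

-- injectivity of c ↦ "Probe_" ++ c ++ after on equal-length cores
lemma pvFmt_core_inj (after : String) {c d : String}
    (h : "Probe_" ++ c ++ after = "Probe_" ++ d ++ after) : c = d := by
  have h4 : c.toList = d.toList := by
    have := congrArg String.toList h
    simpa using this
  have : String.ofList c.toList = String.ofList d.toList := by rw [h4]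
  simpa using this

def pvAllIds : List Int := pvWestIds ++ pvSouthIds ++ pvEastIds

lemma pvNodup_all (after : String) : (pvAllIds.map (pvFmt after)).Nodup := by
  have hmap : pvAllIds.map (pvFmt after)
      = (pvAllIds.map pvCore).map (fun c => "Probe_" ++ c ++ after) := by
    simp [List.map_map, Function.comp, pvFmt_eq]
  rw [hmap]
  apply List.Nodup.map_on
  · intro c hc d hd h
    exact pvFmt_core_inj after h
  · decide

lemma pvFilter_of_not_mem (l : List String) (m : String) (h : m ∉ l) :
    l.filter (fun x => !(x == m)) = l := by
  apply List.filter_eq_self.mpr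
  intro x hx
  simp only [Bool.not_eq_eq_eq_not, Bool.not_true, beq_eq_false_iff_ne, ne_eq]
  rintro rfl; exact h hx

lemma pvRemove_eq_filter (l : List String) (m : String) (hn : l.Nodup) (hm : m ∈ l) :
    (PySem.List.remove? l m).getD l = l.filter (fun x => !(x == m)) := by
  rw [PySem.List.remove?_eq_some_erase l m hm, Option.getD_some, hn.erase_eq_filter]
  apply List.filter_congr
  intro x _
  simp [bne]

-- one loop step on a nodup concatenation is a filter on each component
lemma pvStep_eq (m : String) (w s e : List String) (h : (w ++ s ++ e).Nodup) :
    pvStep (w, s, e) m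
      = (w.filter (fun x => !(x == m)), s.filter (fun x => !(x == m)),
         e.filter (fun x => !(x == m))) := by
  simp only [List.nodup_append] at h
  obtain ⟨⟨hw, hs, hws'⟩, he, hwse⟩ := h
  have hws : ∀ x ∈ w, x ∉ s := fun x hx hxs => hws' x hx x hxs rfl
  have hwe : ∀ x ∈ w, x ∉ e := fun x hx hxe => hwse x (List.mem_append_left _ hx) x hxe rfl
  have hse : ∀ x ∈ s, x ∉ e := fun x hx hxe => hwse x (List.mem_append_right _ hx) x hxe rfl
  simp only [pvStep]
  by_cases h1 : m ∈ w
  · rw [if_pos h1, pvRemove_eq_filter w m hw h1,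
      pvFilter_of_not_mem s m (hws m h1), pvFilter_of_not_mem e m (hwe m h1)]
  · rw [if_neg h1, pvFilter_of_not_mem w m h1]
    by_cases h2 : m ∈ s
    · rw [if_pos h2, pvRemove_eq_filter s m hs h2,
        pvFilter_of_not_mem e m (hse m h2)]
    · rw [if_neg h2, pvFilter_of_not_mem s m h2]
      by_cases h3 : m ∈ e
      · rw [if_pos h3, pvRemove_eq_filter e m he h3]
      · rw [if_neg h3, pvFilter_of_not_mem e m h3]

lemma pvLoop_eq (ms : List String) (w s e : List String) (h : (w ++ s ++ e).Nodup) :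
    ms.foldl pvStep (w, s, e)
      = (w.filter (fun x => decide (x ∉ ms)), s.filter (fun x => decide (x ∉ ms)),
         e.filter (fun x => decide (x ∉ ms))) := by
  induction ms generalizing w s e with
  | nil => simp
  | cons m ms ih =>
    rw [List.foldl_cons, pvStep_eq m w s e h]
    have h' : (w.filter (fun x => !(x == m)) ++ s.filter (fun x => !(x == m))
        ++ e.filter (fun x => !(x == m))).Nodup := by
      refine h.sublist ?_
      exact ((List.filter_sublist.append List.filter_sublist).append List.filter_sublist)
    rw [ih _ _ _ h']
    simp only [List.filter_filter]
    refine congrArg₂ _ ?_ (congrArg₂ _ ?_ ?_) <;>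
      · apply List.filter_congr
        intro x _
        simp [List.mem_cons, not_or, Bool.and_comm, beq_eq_decide]

-- ===== VERDICT (by name: the statement is the Claim_ definition above) =====
theorem get_ID_strings_spec : Claim_equal_get_ID_strings := by
  intro after mb _
  unfold Spec_get_ID_strings
  have hnodup : (pvWestIds.map (pvFmt after) ++ (pvSouthIds.map (pvFmt after)
      ++ pvEastIds.map (pvFmt after))).Nodup := by
    have := pvNodup_all after
    simpa [pvAllIds, List.map_append] using this
  cases mb with
  | none =>
      simp [get_ID_strings, get_ID_strings_alt, pvBuild, PySem.Set.empty,
        PySem.Set.contains]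
  | some ms =>
      simp only [get_ID_strings, get_ID_strings_alt, pvBuild]
      rw [pvLoop_eq ms _ _ _ (by simpa [List.append_assoc] using hnodup)]
      refine congrArg₂ _ ?_ (congrArg₂ _ ?_ ?_) <;>
        · apply List.filter_congr
          intro x _
          simp [PySem.Set.mem_ofList]
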